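-- pv_equiv track=rewrite | github.com/Mr-Vijay16/LeetCode-Problems | Day9.py | min_hamming_distance
-- ===== SOURCE A (Python) =====
-- class DSU:
--     def __init__(self, n):
--         self.parent = list(range(n))
--
--     def find(self, x):
--         if self.parent[x] != x:
--             self.parent[x] = self.find(self.parent[x])
--         return self.parent[x]
--
--     def union(self, x, y):
--         px, py = self.find(x), self.find(y)
--         if px != py:
--             self.parent[px] = py
--
-- def min_hamming_distance(source, target, allowed_swaps):
--     n = len(source)
--     dsu = DSU(n)
--
--     # Step 1: Group indices using DSU
--     for a, b in allowed_swaps: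
--         dsu.union(a, b)
--
--     from collections import defaultdict, Counter
--
--     groups = defaultdict(list)
--
--     # Step 2: Collect indices by root
--     for i in range(n):
--         root = dsu.find(i)
--         groups[root].append(i)
--
--     res = 0
--
--     # Step 3: Compare frequencies inside each group
--     for indices in groups.values():
--         src_count = Counter(source[i] for i in indices)
--         tgt_count = Counter(target[i] for i in indices)
--
--         for val in src_count:
--             if val in tgt_count:
--                 matched = min(src_count[val], tgt_count[val])
--                 src_count[val] -= matched
--
--         res += sum(src_count.values())
--
--     return res
-- ===== SOURCE B (Python) =====
-- def min_hamming_distance(source, target, allowed_swaps):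
--     # Label-relabel connected components (no union-find), then one signed
--     # frequency dict per component; mismatches = sum of positive counts.
--     n = len(source)
--     labels = list(range(n))
--     for a, b in allowed_swaps:
--         la, lb = labels[a], labels[b]
--         if la != lb:
--             labels = [lb if x == la else x for x in labels]
--     diff = {}
--     for i in range(n):
--         c = diff.setdefault(labels[i], {})
--         c[source[i]] = c.get(source[i], 0) + 1
--         c[target[i]] = c.get(target[i], 0) - 1
--     return sum(v for c in diff.values() for v in c.values() if v > 0)
-- ===== Notes on version B (the rewrite author's own statement) =====
-- stated objective: alternative
-- what changed: Replaces the recursive path-compressing union-find plus defaultdict grouping plus two Counters with explicit min-matching per group by a label-relabelling component array (each swap rewrites one class label over the array) and a single signed frequency dict per component whose positive entries are summed; trades union-find's near-linear swap processing for a simpler O(n) relabel per swap.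
import Mathlib
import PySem

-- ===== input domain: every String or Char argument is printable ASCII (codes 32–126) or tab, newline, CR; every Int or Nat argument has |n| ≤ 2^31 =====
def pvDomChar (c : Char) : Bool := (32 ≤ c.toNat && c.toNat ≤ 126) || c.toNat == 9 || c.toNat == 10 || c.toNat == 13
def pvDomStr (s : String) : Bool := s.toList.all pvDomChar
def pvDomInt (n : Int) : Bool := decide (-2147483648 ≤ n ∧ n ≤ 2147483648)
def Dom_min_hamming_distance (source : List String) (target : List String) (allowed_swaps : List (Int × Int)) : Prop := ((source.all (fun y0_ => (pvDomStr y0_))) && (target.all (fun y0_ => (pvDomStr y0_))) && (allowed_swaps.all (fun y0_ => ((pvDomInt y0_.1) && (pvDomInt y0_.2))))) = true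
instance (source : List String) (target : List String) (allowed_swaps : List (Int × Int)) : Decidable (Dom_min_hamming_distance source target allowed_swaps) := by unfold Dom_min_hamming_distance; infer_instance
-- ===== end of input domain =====

-- B replaces A's union-find + per-group Counter matching by a label-relabelling
-- component array and one signed frequency dict per component (objective: alternative).

-- ===== PORT A =====
-- DSU.find with path compression: fuel-guarded recursion (the guard only makes the
-- same recursion total; under Pre_ the fuel n+1 is never exhausted — proved below).
def dsuFind : Nat → List Int → Int → List Int × Int
  | 0, parent, x => (parent, x)
  | fuel+1, parent, x =>
    let px := PySem.List.pyGetD parent x 0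
    if px ≠ x then
      let r := dsuFind fuel parent px
      let p2 := PySem.List.pySetD r.1 x r.2
      (p2, PySem.List.pyGetD p2 x 0)
    else (parent, px)

def dsuUnion (fuel : Nat) (parent : List Int) (x y : Int) : List Int :=
  let fx := dsuFind fuel parent x
  let fy := dsuFind fuel fx.1 y
  if fx.2 ≠ fy.2 then PySem.List.pySetD fy.1 fx.2 fy.2 else fy.1

def min_hamming_distance (source : List String) (target : List String) (allowed_swaps : List (Int × Int)) : Int :=
  let n := source.length
  let dsu1 := allowed_swaps.foldl (fun p ab => dsuUnion (n+1) p ab.1 ab.2) (PySem.List.pyRange 0 n 1)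
  let st := (PySem.List.pyRange 0 n 1).foldl
      (fun (st : List Int × PySem.Dict Int (List Int)) i =>
        let f := dsuFind (n+1) st.1 i
        (f.1, st.2.modify f.2 [] (· ++ [i])))
      (dsu1, PySem.Dict.empty)
  st.2.values.foldl (fun res indices =>
    let srcCount := PySem.Dict.counter (indices.map (fun i => PySem.List.pyGetD source i ""))
    let tgtCount := PySem.Dict.counter (indices.map (fun i => PySem.List.pyGetD target i ""))
    let srcCount2 := srcCount.keys.foldl (fun (sc : PySem.Dict String Int) val =>
        if tgtCount.contains val then
          sc.insert val (sc.getD val 0 - min (sc.getD val 0) (tgtCount.getD val 0))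
        else sc) srcCount
    res + srcCount2.values.sum) 0

-- ===== PORT B =====
def min_hamming_distance_alt (source : List String) (target : List String) (allowed_swaps : List (Int × Int)) : Int :=
  let n := source.length
  let labels := allowed_swaps.foldl (fun (labels : List Int) ab =>
      let la := PySem.List.pyGetD labels ab.1 0
      let lb := PySem.List.pyGetD labels ab.2 0
      if la ≠ lb then labels.map (fun x => if x = la then lb else x) else labels)
    (PySem.List.pyRange 0 n 1)
  let diff := (PySem.List.pyRange 0 n 1).foldl
      (fun (d : PySem.Dict Int (PySem.Dict String Int)) i =>
        d.modify (PySem.List.pyGetD labels i 0) PySem.Dict.empty (fun c =>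
          let s := PySem.List.pyGetD source i ""
          let c1 := c.insert s (c.getD s 0 + 1)
          let t := PySem.List.pyGetD target i ""
          c1.insert t (c1.getD t 0 - 1)))
      PySem.Dict.empty
  (diff.values.map (fun c => (c.values.filter (fun v => 0 < v)).sum)).sum

-- ===== PRECONDITION & SPEC =====
-- Pre_ excludes exactly the inputs where the Python A raises IndexError: a swap index
-- outside [-n, n) (n = len(source)), or a target shorter than source.
def Pre_min_hamming_distance (source : List String) (target : List String) (allowed_swaps : List (Int × Int)) : Prop :=
  source.length ≤ target.length ∧
  ∀ p ∈ allowed_swaps, (-(source.length : Int) ≤ p.1 ∧ p.1 < source.length) ∧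
    (-(source.length : Int) ≤ p.2 ∧ p.2 < source.length)
instance (source : List String) (target : List String) (allowed_swaps : List (Int × Int)) : Decidable (Pre_min_hamming_distance source target allowed_swaps) := by unfold Pre_min_hamming_distance; infer_instance

def pvWitness_min_hamming_distance : List String × List String × (List (Int × Int)) :=
  (["a", "b", "c"], ["b", "a", "c"], [(0, 1), (1, -1)])

def Spec_min_hamming_distance (source : List String) (target : List String) (allowed_swaps : List (Int × Int)) (out : Int) : Prop := out = min_hamming_distance_alt source target allowed_swaps
instance (source : List String) (target : List String) (allowed_swaps : List (Int × Int)) (out : Int) : Decidable (Spec_min_hamming_distance source target allowed_swaps out) := by unfold Spec_min_hamming_distance; infer_instance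

-- ===== CLAIM (what is proved, stated in full; the proofs are below) =====
def Claim_equal_min_hamming_distance : Prop := ∀ (source : List String) (target : List String) (allowed_swaps : List (Int × Int)), Dom_min_hamming_distance source target allowed_swaps → Pre_min_hamming_distance source target allowed_swaps → Spec_min_hamming_distance source target allowed_swaps (min_hamming_distance source target allowed_swaps)

-- ===== LEMMAS AND PROOFS =====

-- Nat-level view of a parent/label array entry.
def pget (p : List Int) (i : Nat) : Nat := (p.getD i 0).toNat

-- Fuelled walk to the root of the parent forest.
def rootIter (p : List Int) : Nat → Nat → Nat
  | 0, i => i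
  | k+1, i => if pget p i = i then i else rootIter p k (pget p i)

def rootp (n : Nat) (p : List Int) (i : Nat) : Nat := rootIter p n i

-- DSU invariant: length n, entries in [0, n), and an acyclicity measure
-- strictly decreasing toward the root.
def DInv (n : Nat) (p : List Int) : Prop :=
  p.length = n ∧ (∀ i, i < n → p.getD i 0 = ((pget p i : Nat) : Int) ∧ pget p i < n) ∧
  ∃ f : Nat → Nat, ∀ i, i < n → pget p i ≠ i → f (pget p i) < f i

-- Python's negative-index wraparound, as a Nat index.
def normIdx (n : Nat) (a : Int) : Nat := if a < 0 then (a + n).toNat else a.toNat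

-- correspondence between the DSU parent array and B's label array
def Corr (n : Nat) (p : List Int) (labels : List Int) : Prop :=
  DInv n p ∧ labels.length = n ∧
  ∀ i, i < n → ∀ j, j < n →
    (labels.getD i 0 = labels.getD j 0 ↔ rootp n p i = rootp n p j)

theorem rootIter_root (p : List Int) (i : Nat) (h : pget p i = i) :
    ∀ m, rootIter p m i = i := by
  intro m; induction m with
  | zero => rfl
  | succ m ih => simp [rootIter, h]

theorem rootIter_add (p : List Int) (a b i : Nat) :
    rootIter p (a + b) i = rootIter p b (rootIter p a i) := by
  induction a generalizing i with
  | zero => rw [Nat.zero_add]; rfl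
  | succ a ih =>
    by_cases h : pget p i = i
    · simp [rootIter, h, rootIter_root p i h]
    · have : a + 1 + b = (a + b) + 1 := by omega
      rw [this]
      simp only [rootIter, h]
      exact ih (pget p i)

theorem rootIter_stable (p : List Int) (k m i : Nat) (hk : k ≤ m)
    (h : pget p (rootIter p k i) = rootIter p k i) :
    rootIter p m i = rootIter p k i := by
  have : m = k + (m - k) := by omega
  rw [this, rootIter_add]
  exact rootIter_root _ _ h _


theorem rootIter_succ (p : List Int) (k i : Nat) (h : pget p i ≠ i) :
    rootIter p (k+1) i = rootIter p k (pget p i) := by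
  simp [rootIter, h]

theorem rootIter_lt (n : Nat) (p : List Int)
    (hrange : ∀ i, i < n → p.getD i 0 = ((pget p i : Nat) : Int) ∧ pget p i < n)
    (i : Nat) (hi : i < n) : ∀ k, rootIter p k i < n := by
  intro k; induction k generalizing i with
  | zero => exact hi
  | succ k ih =>
    by_cases h : pget p i = i
    · simpa [rootIter, h] using hi
    · rw [rootIter_succ p k i h]
      exact ih _ (hrange i hi).2

theorem f_chain (n : Nat) (p : List Int)
    (hrange : ∀ i, i < n → p.getD i 0 = ((pget p i : Nat) : Int) ∧ pget p i < n)
    (f : Nat → Nat) (hf : ∀ i, i < n → pget p i ≠ i → f (pget p i) < f i)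
    (i : Nat) (hi : i < n) :
    ∀ k, pget p (rootIter p k i) = rootIter p k i ∨
      f (rootIter p (k+1) i) < f (rootIter p k i) := by
  intro k; induction k generalizing i with
  | zero =>
    by_cases h : pget p i = i
    · exact Or.inl h
    · right
      rw [rootIter_succ p 0 i h]
      exact hf i hi h
  | succ k ih =>
    by_cases h : pget p i = i
    · left; rw [rootIter_root p i h]; exact h
    · rw [rootIter_succ p k i h, rootIter_succ p (k+1) i h]
      exact ih _ (hrange i hi).2

theorem f_rootIter_lt (n : Nat) (p : List Int)
    (hrange : ∀ i, i < n → p.getD i 0 = ((pget p i : Nat) : Int) ∧ pget p i < n)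
    (f : Nat → Nat) (hf : ∀ i, i < n → pget p i ≠ i → f (pget p i) < f i) :
    ∀ k i, i < n → rootIter p k i = i ∨ f (rootIter p k i) < f i := by
  intro k; induction k with
  | zero => intro i _; exact Or.inl rfl
  | succ k ih =>
    intro i hi
    by_cases h : pget p i = i
    · left; exact rootIter_root p i h _
    · rw [rootIter_succ p k i h]
      rcases ih (pget p i) (hrange i hi).2 with h2 | h2
      · right; rw [h2]; exact hf i hi h
      · right; exact lt_trans h2 (hf i hi h)

theorem exists_root (n : Nat) (p : List Int) (hInv : DInv n p) (i : Nat) (hi : i < n) :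
    ∃ j, j < n ∧ pget p (rootIter p j i) = rootIter p j i := by
  obtain ⟨hlen, hrange, f, hf⟩ := hInv
  by_contra hno
  push Not at hno
  have mono : ∀ j2, j2 ≤ n → ∀ j1, j1 < j2 → f (rootIter p j2 i) < f (rootIter p j1 i) := by
    intro j2
    induction j2 with
    | zero => intro _ j1 hj1; omega
    | succ j2 ih =>
      intro hle j1 hj1
      have hstep : f (rootIter p (j2+1) i) < f (rootIter p j2 i) := by
        rcases f_chain n p hrange f hf i hi j2 with h | h
        · exact absurd h (hno j2 (by omega))
        · exact h
      rcases Nat.lt_or_ge j1 j2 with h | h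
      · exact lt_trans hstep (ih (by omega) j1 h)
      · have : j1 = j2 := by omega
        subst this; exact hstep
  have hinj : ∀ j1, j1 ≤ n → ∀ j2, j2 ≤ n → rootIter p j1 i = rootIter p j2 i → j1 = j2 := by
    intro j1 h1 j2 h2 he
    rcases Nat.lt_trichotomy j1 j2 with h | h | h
    · exact absurd (mono j2 h2 j1 h) (by rw [he]; exact lt_irrefl _)
    · exact h
    · exact absurd (mono j1 h1 j2 h) (by rw [he]; exact lt_irrefl _)
  have hnodup : ((List.range (n+1)).map (fun j => rootIter p j i)).Nodup := by
    refine List.Nodup.map_on ?_ List.nodup_range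
    intro x hx y hy hxy
    have hx' : x ≤ n := by have := List.mem_range.mp hx; omega
    have hy' : y ≤ n := by have := List.mem_range.mp hy; omega
    exact hinj x hx' y hy' hxy
  have hsub : ((List.range (n+1)).map (fun j => rootIter p j i)) ⊆ List.range n := by
    intro x hx
    simp only [List.mem_map] at hx
    obtain ⟨j, _, rfl⟩ := hx
    exact List.mem_range.mpr (rootIter_lt n p hrange i hi j)
  have hle := (List.subperm_of_subset hnodup hsub).length_le
  simp at hle
theorem rootp_of_root (n : Nat) (p : List Int) (i : Nat) (h : pget p i = i) :
    rootp n p i = i := rootIter_root p i h n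

theorem root_rootp (n : Nat) (p : List Int) (hInv : DInv n p) (i : Nat) (hi : i < n) :
    pget p (rootp n p i) = rootp n p i := by
  obtain ⟨j, hj, hr⟩ := exists_root n p hInv i hi
  unfold rootp
  rw [rootIter_stable p j n i (by omega) hr]
  exact hr

theorem rootp_lt (n : Nat) (p : List Int) (hInv : DInv n p) (i : Nat) (hi : i < n) :
    rootp n p i < n := rootIter_lt n p hInv.2.1 i hi n

theorem rootp_pget (n : Nat) (p : List Int) (hInv : DInv n p) (i : Nat) (hi : i < n)
    (h : pget p i ≠ i) : rootp n p (pget p i) = rootp n p i := by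
  obtain ⟨j, hj, hr⟩ := exists_root n p hInv (pget p i) (hInv.2.1 i hi).2
  have h1 : rootp n p i = rootIter p (n-1) (pget p i) := by
    unfold rootp
    have hn : n = (n-1)+1 := by omega
    conv_lhs => rw [hn]
    exact rootIter_succ p (n-1) i h
  rw [h1]
  unfold rootp
  rw [rootIter_stable p j n _ (by omega) hr, rootIter_stable p j (n-1) _ (by omega) hr]

theorem rootp_idem (n : Nat) (p : List Int) (hInv : DInv n p) (i : Nat) (hi : i < n) :
    rootp n p (rootp n p i) = rootp n p i :=
  rootp_of_root n p _ (root_rootp n p hInv i hi)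

theorem root_iff_rootp (n : Nat) (p : List Int) (hInv : DInv n p) (i : Nat) (hi : i < n) :
    pget p i = i ↔ rootp n p i = i := by
  constructor
  · exact rootp_of_root n p i
  · intro h
    have := root_rootp n p hInv i hi
    rwa [h] at this

theorem getD_set_lt (l : List Int) (x : Nat) (v : Int) (j : Nat) (hx : x < l.length) :
    (l.set x v).getD j 0 = if j = x then v else l.getD j 0 := by
  simp only [List.getD_eq_getElem?_getD, List.getElem?_set]
  by_cases hj : x = j
  · subst hj; simp [hx]
  · simp [hj, Ne.symm hj]

theorem pget_set (p : List Int) (x v j : Nat) (hx : x < p.length) :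
    pget (p.set x ((v:Nat):Int)) j = if j = x then v else pget p j := by
  unfold pget
  rw [getD_set_lt p x _ j hx]
  split_ifs <;> simp

theorem set_getD_self (l : List Int) (i : Nat) (hi : i < l.length) :
    l.set i (l.getD i 0) = l := by
  rw [List.getD_eq_getElem l 0 hi]
  exact List.set_getElem_self hi

theorem pyGetD_norm (xs : List Int) (a d : Int) (h1 : -(xs.length:Int) ≤ a)
    (h2 : a < (xs.length:Int)) :
    PySem.List.pyGetD xs a d = xs.getD (normIdx xs.length a) d := by
  by_cases h : a < 0
  · have hk1 : 0 < (-a).toNat := by omega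
    have hk2 : (-a).toNat ≤ xs.length := by omega
    have ha : a = -(((-a).toNat : Nat) : Int) := by omega
    have hn : normIdx xs.length a = xs.length - (-a).toNat := by unfold normIdx; split_ifs <;> omega
    have hb := PySem.List.pyGetD_neg_natCast xs (-a).toNat d hk1 hk2
    rw [show (-(((-a).toNat:Nat):Int)) = a by omega] at hb
    rw [hb, ← List.getD_eq_getElem xs d (show xs.length - (-a).toNat < xs.length by omega), hn]
  · rw [show a = ((a.toNat : Nat) : Int) by omega, PySem.List.pyGetD_natCast]
    have hn : normIdx xs.length ((a.toNat : Nat) : Int) = a.toNat := by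
      unfold normIdx; split_ifs <;> omega
    rw [hn]

theorem pySetD_norm (xs : List Int) (a v : Int) (h1 : -(xs.length:Int) ≤ a)
    (h2 : a < (xs.length:Int)) :
    PySem.List.pySetD xs a v = xs.set (normIdx xs.length a) v := by
  by_cases h : a < 0
  · have hn : normIdx xs.length a = (a + xs.length).toNat := by unfold normIdx; split_ifs <;> omega
    rw [hn]
    simp only [PySem.List.pySetD, PySem.List.pySet?, PySem.List.pyIdx?]
    split_ifs <;> try omega
    rw [show (a + (xs.length:Int)).toNat = xs.length - (-a).toNat by omega]
    rfl
  · rw [show a = ((a.toNat : Nat) : Int) by omega, PySem.List.pySetD_natCast]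
    have hn : normIdx xs.length ((a.toNat : Nat) : Int) = a.toNat := by
      unfold normIdx; split_ifs <;> omega
    rw [hn]

-- shifted acyclicity measure used when writing entry x := w
def shiftF (n : Nat) (p : List Int) (f : Nat → Nat) (x w : Nat) (j : Nat) : Nat :=
  if rootp n p j = rootp n p x then f j + f w + 1 else f j

theorem setW_ok (n : Nat) (p : List Int) (hInv : DInv n p) (x w : Nat) (hx : x < n) (hw : w < n)
    (hwr : pget p w = w) (hxw : x ≠ w) (hcase : w = rootp n p x ∨ pget p x = x) :
    DInv n (p.set x ((w:Nat):Int)) ∧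
    ∀ j, j < n → rootp n (p.set x ((w:Nat):Int)) j =
      if rootp n p j = rootp n p x then rootp n p w else rootp n p j := by
  obtain ⟨hlen, hrange, f, hf⟩ := hInv
  have hInv' : DInv n p := ⟨hlen, hrange, f, hf⟩
  have hxl : x < p.length := by omega
  have hpg : ∀ j, pget (p.set x ((w:Nat):Int)) j = if j = x then w else pget p j :=
    fun j => pget_set p x w j hxl
  have hgd : ∀ j, (p.set x ((w:Nat):Int)).getD j 0 = if j = x then ((w:Nat):Int) else p.getD j 0 :=
    fun j => getD_set_lt p x _ j hxl
  have hlen' : (p.set x ((w:Nat):Int)).length = n := by rw [List.length_set]; exact hlen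
  have hrange' : ∀ i, i < n → (p.set x ((w:Nat):Int)).getD i 0 =
      ((pget (p.set x ((w:Nat):Int)) i : Nat) : Int) ∧ pget (p.set x ((w:Nat):Int)) i < n := by
    intro i hi
    rw [hpg i, hgd i]
    by_cases hix : i = x
    · subst hix
      split_ifs with h'
      · exact ⟨rfl, hw⟩
      · exact absurd rfl h'
    · simp only [if_neg hix]
      exact hrange i hi
  have hrootpw : rootp n p w = w := rootp_of_root n p w hwr
  have hfw : w = rootp n p x → f w < f x := by
    intro hc
    rcases f_rootIter_lt n p hrange f hf n x hx with h | h
    · exfalso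
      have hrx : rootp n p x = x := h
      rw [hrx] at hc
      exact hxw hc.symm
    · have h' : f (rootp n p x) < f x := h
      rw [← hc] at h'
      exact h'
  have hacyc' : ∀ i, i < n → pget (p.set x ((w:Nat):Int)) i ≠ i →
      shiftF n p f x w (pget (p.set x ((w:Nat):Int)) i) < shiftF n p f x w i := by
    intro i hi hne
    rw [hpg i] at hne ⊢
    by_cases hix : i = x
    · subst hix
      rw [if_pos rfl] at hne ⊢
      unfold shiftF
      rw [if_pos rfl]
      by_cases hb : rootp n p w = rootp n p i
      · rw [if_pos hb]
        have hwx : w = rootp n p i := by rw [← hrootpw]; exact hb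
        have := hfw hwx
        omega
      · rw [if_neg hb]
        omega
    · rw [if_neg hix] at hne ⊢
      have hpgi := rootp_pget n p hInv' i hi hne
      unfold shiftF
      by_cases hb : rootp n p i = rootp n p x
      · rw [if_pos hb, if_pos (by rw [hpgi]; exact hb)]
        have := hf i hi hne
        omega
      · rw [if_neg hb, if_neg (by rw [hpgi]; exact hb)]
        exact hf i hi hne
  have hInvNew : DInv n (p.set x ((w:Nat):Int)) :=
    ⟨hlen', hrange', shiftF n p f x w, hacyc'⟩
  refine ⟨hInvNew, ?_⟩
  have main : ∀ j, j < n → rootp n (p.set x ((w:Nat):Int)) x = w ∧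
      (pget p j = j → j ≠ x → rootp n (p.set x ((w:Nat):Int)) j = j) := by
    intro j hj
    constructor
    · have hne : pget (p.set x ((w:Nat):Int)) x ≠ x := by
        rw [hpg x, if_pos rfl]; exact fun h => hxw h.symm
      have h1 := rootp_pget n _ hInvNew x hx hne
      rw [hpg x, if_pos rfl] at h1
      have h2 : rootp n (p.set x ((w:Nat):Int)) w = w := by
        apply rootp_of_root
        rw [hpg w, if_neg (fun h => hxw h.symm)]
        exact hwr
      rw [← h1, h2]
    · intro hroot hjx
      apply rootp_of_root
      rw [hpg j, if_neg hjx]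
      exact hroot
  have key : ∀ m j, j < n → shiftF n p f x w j ≤ m →
      rootp n (p.set x ((w:Nat):Int)) j =
        if rootp n p j = rootp n p x then rootp n p w else rootp n p j := by
    intro m
    induction m with
    | zero =>
      intro j hj hm
      by_cases hjx : j = x
      · subst hjx
        rw [(main j hj).1, if_pos rfl, hrootpw]
      · by_cases hroot : pget p j = j
        · rw [(main j hj).2 hroot hjx]
          have h2 : rootp n p j = j := rootp_of_root n p j hroot
          by_cases hb : rootp n p j = rootp n p x
          · rw [if_pos hb, hrootpw]
            rcases hcase with hc | hc
            · rw [hc, ← hb, h2]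
            · exfalso
              have hrx : rootp n p x = x := rootp_of_root n p x hc
              rw [h2, hrx] at hb
              exact hjx hb
          · rw [if_neg hb, h2]
        · exfalso
          unfold shiftF at hm
          have h1 := hf j hj hroot
          by_cases hb : rootp n p j = rootp n p x
          · rw [if_pos hb] at hm; omega
          · rw [if_neg hb] at hm; omega
    | succ m ih =>
      intro j hj hm
      by_cases hjx : j = x
      · subst hjx
        rw [(main j hj).1, if_pos rfl, hrootpw]
      · by_cases hroot : pget p j = j
        · rw [(main j hj).2 hroot hjx]
          have h2 : rootp n p j = j := rootp_of_root n p j hroot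
          by_cases hb : rootp n p j = rootp n p x
          · rw [if_pos hb, hrootpw]
            rcases hcase with hc | hc
            · rw [hc, ← hb, h2]
            · exfalso
              have hrx : rootp n p x = x := rootp_of_root n p x hc
              rw [h2, hrx] at hb
              exact hjx hb
          · rw [if_neg hb, h2]
        · have hne : pget (p.set x ((w:Nat):Int)) j ≠ j := by
            rw [hpg j, if_neg hjx]; exact hroot
          have h1 := rootp_pget n _ hInvNew j hj hne
          rw [hpg j, if_neg hjx] at h1
          have hplt : pget p j < n := (hrange j hj).2
          have hpgi := rootp_pget n p hInv' j hj hroot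
          have hstep := hf j hj hroot
          have hle : shiftF n p f x w (pget p j) ≤ m := by
            unfold shiftF at hm ⊢
            by_cases hb : rootp n p j = rootp n p x
            · rw [if_pos (by rw [hpgi]; exact hb)]
              rw [if_pos hb] at hm
              omega
            · rw [if_neg (by rw [hpgi]; exact hb)]
              rw [if_neg hb] at hm
              omega
          have h2 := ih (pget p j) hplt hle
          rw [← h1, h2, hpgi]
  intro j hj
  exact key _ j hj le_rfl

theorem dsuFind_succ (m : Nat) (p : List Int) (x : Int) :
    dsuFind (m+1) p x =
      if PySem.List.pyGetD p x 0 ≠ x then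
        (PySem.List.pySetD (dsuFind m p (PySem.List.pyGetD p x 0)).1 x
           (dsuFind m p (PySem.List.pyGetD p x 0)).2,
         PySem.List.pyGetD (PySem.List.pySetD (dsuFind m p (PySem.List.pyGetD p x 0)).1 x
           (dsuFind m p (PySem.List.pyGetD p x 0)).2) x 0)
      else (p, PySem.List.pyGetD p x 0) := rfl

theorem dsuFind_root (n : Nat) (fuel : Nat) (p : List Int) (x : Nat) (hInv : DInv n p)
    (hx : x < n) (hroot : pget p x = x) (hf : 0 < fuel) :
    dsuFind fuel p ((x:Nat):Int) = (p, ((x:Nat):Int)) := by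
  obtain ⟨m, rfl⟩ : ∃ m, fuel = m+1 := ⟨fuel-1, by omega⟩
  rw [dsuFind_succ]
  have hpx : PySem.List.pyGetD p ((x:Nat):Int) 0 = ((x:Nat):Int) := by
    rw [PySem.List.pyGetD_natCast, (hInv.2.1 x hx).1, hroot]
  rw [if_neg (by rw [hpx]; exact not_not_intro rfl), hpx]

theorem dsuFind_ok (n : Nat) : ∀ k fuel (p : List Int) (x : Nat), DInv n p → x < n →
    pget p (rootIter p k x) = rootIter p k x → k < fuel →
    (dsuFind fuel p ((x:Nat):Int)).2 = ((rootp n p x : Nat) : Int) ∧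
    DInv n (dsuFind fuel p ((x:Nat):Int)).1 ∧
    (∀ j, j < n → rootp n (dsuFind fuel p ((x:Nat):Int)).1 j = rootp n p j) := by
  intro k
  induction k with
  | zero =>
    intro fuel p x hInv hx hroot hfuel
    have hr : pget p x = x := hroot
    rw [dsuFind_root n fuel p x hInv hx hr (by omega)]
    refine ⟨?_, hInv, fun j hj => rfl⟩
    show ((x:Nat):Int) = _
    rw [rootp_of_root n p x hr]
  | succ k ih =>
    intro fuel p x hInv hx hroot hfuel
    by_cases hr : pget p x = x
    · rw [dsuFind_root n fuel p x hInv hx hr (by omega)]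
      refine ⟨?_, hInv, fun j hj => rfl⟩
      show ((x:Nat):Int) = _
      rw [rootp_of_root n p x hr]
    · obtain ⟨m, rfl⟩ : ∃ m, fuel = m+1 := ⟨fuel-1, by omega⟩
      rw [dsuFind_succ]
      have hpx : PySem.List.pyGetD p ((x:Nat):Int) 0 = ((pget p x : Nat) : Int) := by
        rw [PySem.List.pyGetD_natCast]; exact (hInv.2.1 x hx).1
      have hcond : PySem.List.pyGetD p ((x:Nat):Int) 0 ≠ ((x:Nat):Int) := by
        rw [hpx]; intro hh; apply hr; exact_mod_cast hh
      rw [if_pos hcond, hpx]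
      have hplt : pget p x < n := (hInv.2.1 x hx).2
      have hroot' : pget p (rootIter p k (pget p x)) = rootIter p k (pget p x) := by
        rw [← rootIter_succ p k x hr]; exact hroot
      obtain ⟨h2, hInvr, hpres⟩ := ih m p (pget p x) hInv hplt hroot' (by omega)
      have hrpg : rootp n p (pget p x) = rootp n p x := rootp_pget n p hInv x hx hr
      set r := dsuFind m p ((pget p x : Nat):Int) with hrdef
      rw [hrpg] at h2
      have hwlt : rootp n p x < n := rootp_lt n p hInv x hx
      have hset : PySem.List.pySetD r.1 ((x:Nat):Int) r.2 =
          r.1.set x ((rootp n p x : Nat):Int) := by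
        rw [h2, PySem.List.pySetD_natCast]
      have hwrootp : rootp n r.1 (rootp n p x) = rootp n p x := by
        rw [hpres _ hwlt]; exact rootp_idem n p hInv x hx
      have hwr : pget r.1 (rootp n p x) = rootp n p x :=
        (root_iff_rootp n r.1 hInvr _ hwlt).mpr hwrootp
      have hxw : x ≠ rootp n p x := fun hh => hr ((root_iff_rootp n p hInv x hx).mpr hh.symm)
      have hcasew : rootp n p x = rootp n r.1 x ∨ pget r.1 x = x := Or.inl (hpres x hx).symm
      obtain ⟨hswInv, hswroot⟩ := setW_ok n r.1 hInvr x (rootp n p x) hx hwlt hwr hxw hcasew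
      refine ⟨?_, ?_, ?_⟩
      · show PySem.List.pyGetD (PySem.List.pySetD r.1 ((x:Nat):Int) r.2) ((x:Nat):Int) 0 = _
        rw [hset, PySem.List.pyGetD_natCast, getD_set_lt _ x _ x (by rw [hInvr.1]; exact hx),
          if_pos rfl]
      · show DInv n (PySem.List.pySetD r.1 ((x:Nat):Int) r.2)
        rw [hset]; exact hswInv
      · intro j hj
        show rootp n (PySem.List.pySetD r.1 ((x:Nat):Int) r.2) j = _
        rw [hset, hswroot j hj, hpres x hx, hwrootp]
        by_cases hb : rootp n r.1 j = rootp n p x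
        · rw [if_pos hb, ← hb, hpres j hj]
        · rw [if_neg hb, hpres j hj]

theorem dsuFind_any (n : Nat) (p : List Int) (hInv : DInv n p) (a : Int)
    (ha1 : -(n:Int) ≤ a) (ha2 : a < (n:Int)) :
    (dsuFind (n+1) p a).2 = ((rootp n p (normIdx n a) : Nat) : Int) ∧
    DInv n (dsuFind (n+1) p a).1 ∧
    (∀ j, j < n → rootp n (dsuFind (n+1) p a).1 j = rootp n p j) := by
  have hn0 : 0 < n := by omega
  have hna : normIdx n a < n := by unfold normIdx; split_ifs <;> omega
  by_cases hpos : 0 ≤ a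
  · have hax : a = ((normIdx n a : Nat) : Int) := by unfold normIdx; split_ifs <;> omega
    obtain ⟨kk, hkk, hkroot⟩ := exists_root n p hInv (normIdx n a) hna
    rw [hax]
    exact dsuFind_ok n kk (n+1) p (normIdx n a) hInv hna hkroot (by omega)
  · have hlen : p.length = n := hInv.1
    have hb := pyGetD_norm p a 0 (by rw [hlen]; exact ha1) (by rw [hlen]; exact_mod_cast ha2)
    rw [hlen] at hb
    have hgetD : PySem.List.pyGetD p a 0 = ((pget p (normIdx n a) : Nat) : Int) := by
      rw [hb]; exact (hInv.2.1 _ hna).1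
    rw [show n + 1 = n + 1 from rfl, dsuFind_succ]
    have hcond : PySem.List.pyGetD p a 0 ≠ a := by rw [hgetD]; omega
    rw [if_pos hcond, hgetD]
    by_cases hnr : pget p (normIdx n a) = normIdx n a
    · rw [hnr, dsuFind_root n n p (normIdx n a) hInv hna hnr (by omega)]
      have hsetd : PySem.List.pySetD p a ((normIdx n a : Nat):Int) = p := by
        have hsn := pySetD_norm p a ((normIdx n a : Nat):Int) (by rw [hlen]; exact ha1)
          (by rw [hlen]; exact_mod_cast ha2)
        rw [hlen] at hsn
        rw [hsn, show ((normIdx n a:Nat):Int) = p.getD (normIdx n a) 0 by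
            rw [(hInv.2.1 _ hna).1, hnr],
          set_getD_self p (normIdx n a) (by omega)]
      rw [hsetd]
      refine ⟨?_, hInv, fun j hj => rfl⟩
      show PySem.List.pyGetD p a 0 = _
      rw [hgetD, hnr, rootp_of_root n p (normIdx n a) hnr]
    · obtain ⟨kk, hkk, hkroot⟩ := exists_root n p hInv (pget p (normIdx n a)) (hInv.2.1 _ hna).2
      obtain ⟨h2, hInvr, hpres⟩ := dsuFind_ok n kk n p (pget p (normIdx n a)) hInv
        (hInv.2.1 _ hna).2 hkroot (by omega)
      have hrpg : rootp n p (pget p (normIdx n a)) = rootp n p (normIdx n a) :=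
        rootp_pget n p hInv (normIdx n a) hna hnr
      set r := dsuFind n p ((pget p (normIdx n a) : Nat):Int) with hrdef
      rw [hrpg] at h2
      have hwlt : rootp n p (normIdx n a) < n := rootp_lt n p hInv _ hna
      have hset : PySem.List.pySetD r.1 a r.2 =
          r.1.set (normIdx n a) ((rootp n p (normIdx n a) : Nat):Int) := by
        have hsn := pySetD_norm r.1 a r.2 (by rw [hInvr.1]; exact ha1)
          (by rw [hInvr.1]; exact_mod_cast ha2)
        rw [hInvr.1] at hsn
        rw [h2] at hsn
        rw [h2, hsn]
      have hwrootp : rootp n r.1 (rootp n p (normIdx n a)) = rootp n p (normIdx n a) := by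
        rw [hpres _ hwlt]; exact rootp_idem n p hInv _ hna
      have hwr : pget r.1 (rootp n p (normIdx n a)) = rootp n p (normIdx n a) :=
        (root_iff_rootp n r.1 hInvr _ hwlt).mpr hwrootp
      have hxw : normIdx n a ≠ rootp n p (normIdx n a) := fun hh =>
        hnr ((root_iff_rootp n p hInv _ hna).mpr hh.symm)
      have hcasew : rootp n p (normIdx n a) = rootp n r.1 (normIdx n a) ∨
          pget r.1 (normIdx n a) = normIdx n a := Or.inl (hpres _ hna).symm
      obtain ⟨hswInv, hswroot⟩ := setW_ok n r.1 hInvr (normIdx n a)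
        (rootp n p (normIdx n a)) hna hwlt hwr hxw hcasew
      refine ⟨?_, ?_, ?_⟩
      · show PySem.List.pyGetD (PySem.List.pySetD r.1 a r.2) a 0 = _
        have hlen2 : (PySem.List.pySetD r.1 a r.2).length = n := by
          rw [hset, List.length_set, hInvr.1]
        have hb2 := pyGetD_norm (PySem.List.pySetD r.1 a r.2) a 0
          (by rw [hlen2]; exact ha1) (by rw [hlen2]; exact_mod_cast ha2)
        rw [hlen2] at hb2
        rw [hb2, hset, getD_set_lt _ _ _ _ (by rw [hInvr.1]; exact hna), if_pos rfl]
      · show DInv n (PySem.List.pySetD r.1 a r.2)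
        rw [hset]; exact hswInv
      · intro j hj
        show rootp n (PySem.List.pySetD r.1 a r.2) j = _
        rw [hset, hswroot j hj, hpres _ hna, hwrootp]
        by_cases hb3 : rootp n r.1 j = rootp n p (normIdx n a)
        · rw [if_pos hb3, ← hb3, hpres j hj]
        · rw [if_neg hb3, hpres j hj]

theorem dsuUnion_ok (n : Nat) (p : List Int) (hInv : DInv n p) (a b : Int)
    (ha1 : -(n:Int) ≤ a) (ha2 : a < (n:Int)) (hb1 : -(n:Int) ≤ b) (hb2 : b < (n:Int)) :
    DInv n (dsuUnion (n+1) p a b) ∧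
    ∀ j, j < n → rootp n (dsuUnion (n+1) p a b) j =
      if rootp n p j = rootp n p (normIdx n a) then rootp n p (normIdx n b) else rootp n p j := by
  have hna : normIdx n a < n := by unfold normIdx; split_ifs <;> omega
  have hnb : normIdx n b < n := by unfold normIdx; split_ifs <;> omega
  obtain ⟨hfa2, hfaInv, hfapres⟩ := dsuFind_any n p hInv a ha1 ha2
  obtain ⟨hfb2, hfbInv, hfbpres⟩ := dsuFind_any n (dsuFind (n+1) p a).1 hfaInv b hb1 hb2
  have hrb' : rootp n (dsuFind (n+1) p a).1 (normIdx n b) = rootp n p (normIdx n b) :=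
    hfapres _ hnb
  simp only [dsuUnion]
  rw [hfa2, hfb2, hrb']
  by_cases hceq : rootp n p (normIdx n a) = rootp n p (normIdx n b)
  · rw [if_neg (by rw [hceq]; exact not_not_intro rfl)]
    refine ⟨hfbInv, fun j hj => ?_⟩
    rw [hfbpres j hj, hfapres j hj]
    by_cases hb3 : rootp n p j = rootp n p (normIdx n a)
    · rw [if_pos hb3, hb3, hceq]
    · rw [if_neg hb3]
  · rw [if_pos (by intro hh; apply hceq; exact_mod_cast hh)]
    have hra_lt : rootp n p (normIdx n a) < n := rootp_lt n p hInv _ hna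
    have hrb_lt : rootp n p (normIdx n b) < n := rootp_lt n p hInv _ hnb
    have hfy1len : (dsuFind (n+1) (dsuFind (n+1) p a).1 b).1.length = n := hfbInv.1
    have hrootra : rootp n (dsuFind (n+1) (dsuFind (n+1) p a).1 b).1 (rootp n p (normIdx n a)) =
        rootp n p (normIdx n a) := by
      rw [hfbpres _ hra_lt, hfapres _ hra_lt]
      exact rootp_idem n p hInv _ hna
    have hrootrb : rootp n (dsuFind (n+1) (dsuFind (n+1) p a).1 b).1 (rootp n p (normIdx n b)) =
        rootp n p (normIdx n b) := by
      rw [hfbpres _ hrb_lt, hfapres _ hrb_lt]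
      exact rootp_idem n p hInv _ hnb
    have hrar : pget (dsuFind (n+1) (dsuFind (n+1) p a).1 b).1 (rootp n p (normIdx n a)) =
        rootp n p (normIdx n a) :=
      (root_iff_rootp n _ hfbInv _ hra_lt).mpr hrootra
    have hrbr : pget (dsuFind (n+1) (dsuFind (n+1) p a).1 b).1 (rootp n p (normIdx n b)) =
        rootp n p (normIdx n b) :=
      (root_iff_rootp n _ hfbInv _ hrb_lt).mpr hrootrb
    obtain ⟨hswInv, hswroot⟩ := setW_ok n (dsuFind (n+1) (dsuFind (n+1) p a).1 b).1 hfbInv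
      (rootp n p (normIdx n a)) (rootp n p (normIdx n b)) hra_lt hrb_lt hrbr hceq
      (Or.inr hrar)
    rw [PySem.List.pySetD_natCast]
    refine ⟨hswInv, fun j hj => ?_⟩
    rw [hswroot j hj, hrootra, hrootrb, hfbpres j hj, hfapres j hj]

theorem corr_step (n : Nat) (p labels : List Int) (hc : Corr n p labels) (ab : Int × Int)
    (ha1 : -(n:Int) ≤ ab.1) (ha2 : ab.1 < (n:Int)) (hb1 : -(n:Int) ≤ ab.2) (hb2 : ab.2 < (n:Int)) :
    Corr n (dsuUnion (n+1) p ab.1 ab.2)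
      (if PySem.List.pyGetD labels ab.1 0 ≠ PySem.List.pyGetD labels ab.2 0 then
         labels.map (fun x => if x = PySem.List.pyGetD labels ab.1 0
                              then PySem.List.pyGetD labels ab.2 0 else x)
       else labels) := by
  obtain ⟨hInv, hlablen, hiff⟩ := hc
  have hna : normIdx n ab.1 < n := by unfold normIdx; split_ifs <;> omega
  have hnb : normIdx n ab.2 < n := by unfold normIdx; split_ifs <;> omega
  have hga : PySem.List.pyGetD labels ab.1 0 = labels.getD (normIdx n ab.1) 0 := by
    have h := pyGetD_norm labels ab.1 0 (by rw [hlablen]; exact ha1)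
      (by rw [hlablen]; exact_mod_cast ha2)
    rwa [hlablen] at h
  have hgb : PySem.List.pyGetD labels ab.2 0 = labels.getD (normIdx n ab.2) 0 := by
    have h := pyGetD_norm labels ab.2 0 (by rw [hlablen]; exact hb1)
      (by rw [hlablen]; exact_mod_cast hb2)
    rwa [hlablen] at h
  obtain ⟨hInv', hroot'⟩ := dsuUnion_ok n p hInv ab.1 ab.2 ha1 ha2 hb1 hb2
  rw [hga, hgb]
  by_cases hll : labels.getD (normIdx n ab.1) 0 = labels.getD (normIdx n ab.2) 0
  · have hrr : rootp n p (normIdx n ab.1) = rootp n p (normIdx n ab.2) :=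
      (hiff _ hna _ hnb).mp hll
    rw [if_neg (by rw [hll]; exact not_not_intro rfl)]
    refine ⟨hInv', hlablen, ?_⟩
    intro i hi j hj
    have e : ∀ m, m < n → rootp n (dsuUnion (n+1) p ab.1 ab.2) m = rootp n p m := by
      intro m hm
      rw [hroot' m hm]
      by_cases hb : rootp n p m = rootp n p (normIdx n ab.1)
      · rw [if_pos hb, hb, hrr]
      · rw [if_neg hb]
    rw [e i hi, e j hj]
    exact hiff i hi j hj
  · have hrr : rootp n p (normIdx n ab.1) ≠ rootp n p (normIdx n ab.2) := fun hh =>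
      hll ((hiff _ hna _ hnb).mpr hh)
    rw [if_pos hll]
    refine ⟨hInv', by rw [List.length_map]; exact hlablen, ?_⟩
    intro i hi j hj
    have hmap : ∀ m, m < n → (labels.map (fun x =>
        if x = labels.getD (normIdx n ab.1) 0 then labels.getD (normIdx n ab.2) 0 else x)).getD m 0
        = (if labels.getD m 0 = labels.getD (normIdx n ab.1) 0
           then labels.getD (normIdx n ab.2) 0 else labels.getD m 0) := by
      intro m hm
      have h1 : m < (labels.map (fun x =>
          if x = labels.getD (normIdx n ab.1) 0 then labels.getD (normIdx n ab.2) 0 else x)).length := by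
        rw [List.length_map, hlablen]; exact hm
      have h2 : m < labels.length := by rw [hlablen]; exact hm
      rw [List.getD_eq_getElem _ 0 h1, List.getElem_map, List.getD_eq_getElem labels 0 h2]
    rw [hmap i hi, hmap j hj, hroot' i hi, hroot' j hj]
    have bi_a := hiff i hi _ hna
    have bi_b := hiff i hi _ hnb
    have bj_a := hiff j hj _ hna
    have bj_b := hiff j hj _ hnb
    by_cases hia : labels.getD i 0 = labels.getD (normIdx n ab.1) 0 <;>
      by_cases hja : labels.getD j 0 = labels.getD (normIdx n ab.1) 0
    · rw [if_pos hia, if_pos hja, if_pos (bi_a.mp hia), if_pos (bj_a.mp hja)]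
      simp
    · rw [if_pos hia, if_neg hja, if_pos (bi_a.mp hia),
        if_neg (fun hh => hja (bj_a.mpr hh))]
      constructor
      · intro hh; exact ((bj_b.mp hh.symm)).symm
      · intro hh; exact (bj_b.mpr hh.symm).symm
    · rw [if_neg hia, if_pos hja, if_neg (fun hh => hia (bi_a.mpr hh)), if_pos (bj_a.mp hja)]
      exact bi_b
    · rw [if_neg hia, if_neg hja, if_neg (fun hh => hia (bi_a.mpr hh)),
        if_neg (fun hh => hja (bj_a.mpr hh))]
      exact hiff i hi j hj

theorem corr_fold (n : Nat) (swaps : List (Int × Int))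
    (hsw : ∀ q ∈ swaps, (-(n:Int) ≤ q.1 ∧ q.1 < (n:Int)) ∧ (-(n:Int) ≤ q.2 ∧ q.2 < (n:Int))) :
    ∀ p labels, Corr n p labels →
    Corr n (swaps.foldl (fun p ab => dsuUnion (n+1) p ab.1 ab.2) p)
      (swaps.foldl (fun (labels : List Int) ab =>
        let la := PySem.List.pyGetD labels ab.1 0
        let lb := PySem.List.pyGetD labels ab.2 0
        if la ≠ lb then labels.map (fun x => if x = la then lb else x) else labels) labels) := by
  induction swaps with
  | nil => intro p labels hc; exact hc
  | cons q rest ih =>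
    intro p labels hc
    simp only [List.foldl_cons]
    have hq := hsw q List.mem_cons_self
    exact ih (fun r hr => hsw r (List.mem_cons_of_mem q hr)) _ _
      (corr_step n p labels hc q hq.1.1 hq.1.2 hq.2.1 hq.2.2)

theorem pyRange_getD (n : Nat) (i : Nat) (hi : i < n) :
    (PySem.List.pyRange 0 (n:Int) 1).getD i 0 = ((i:Nat):Int) := by
  have hlen : (PySem.List.pyRange 0 (n:Int) 1).length = n := by
    rw [PySem.List.length_pyRange_one]; omega
  rw [List.getD_eq_getElem _ _ (by omega), PySem.List.getElem_pyRange_one]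
  omega

theorem pyRange_length (n : Nat) : (PySem.List.pyRange 0 (n:Int) 1).length = n := by
  rw [PySem.List.length_pyRange_one]; omega

theorem corr_init (n : Nat) :
    Corr n (PySem.List.pyRange 0 (n:Int) 1) (PySem.List.pyRange 0 (n:Int) 1) := by
  have hpg : ∀ i, i < n → pget (PySem.List.pyRange 0 (n:Int) 1) i = i := by
    intro i hi; unfold pget; rw [pyRange_getD n i hi]; omega
  have hInv : DInv n (PySem.List.pyRange 0 (n:Int) 1) := by
    refine ⟨pyRange_length n, ?_, fun _ => 0, ?_⟩
    · intro i hi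
      rw [pyRange_getD n i hi, hpg i hi]
      exact ⟨rfl, hi⟩
    · intro i hi hne
      exact absurd (hpg i hi) hne
  refine ⟨hInv, pyRange_length n, ?_⟩
  intro i hi j hj
  rw [pyRange_getD n i hi, pyRange_getD n j hj,
    rootp_of_root n _ i (hpg i hi), rootp_of_root n _ j (hpg j hj)]
  constructor
  · intro hh; exact_mod_cast hh
  · intro hh; exact_mod_cast hh

theorem groups_fold (n : Nat) (dsu1 : List Int) :
    ∀ (l : List Int), (∀ i ∈ l, ∃ k : Nat, k < n ∧ i = ((k:Nat):Int)) →
    ∀ (p : List Int) (g : PySem.Dict Int (List Int)), DInv n p →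
    (∀ j, j < n → rootp n p j = rootp n dsu1 j) →
    ((l.foldl (fun (st : List Int × PySem.Dict Int (List Int)) i =>
        let f := dsuFind (n+1) st.1 i
        (f.1, st.2.modify f.2 [] (· ++ [i]))) (p, g)).2
     = l.foldl (fun g i => g.modify ((rootp n dsu1 i.toNat : Nat) : Int) [] (· ++ [i])) g) := by
  intro l
  induction l with
  | nil => intro _ p g _ _; rfl
  | cons i rest ih =>
    intro hmem p g hInv hpres
    obtain ⟨k, hk, rfl⟩ := hmem i List.mem_cons_self
    simp only [List.foldl_cons]
    obtain ⟨kk, hkk, hkroot⟩ := exists_root n p hInv k hk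
    obtain ⟨h2, hInv2, hpres2⟩ := dsuFind_ok n kk (n+1) p k hInv hk hkroot (by omega)
    rw [h2, hpres k hk, show (((k:Nat):Int)).toNat = k by omega]
    exact ih (fun x hx => hmem x (List.mem_cons_of_mem _ hx)) _ _ hInv2
      (fun j hj => by rw [hpres2 j hj]; exact hpres j hj)

theorem getD_foldl_modify_fn {κ ν : Type} [BEq κ] [LawfulBEq κ] [DecidableEq κ] (key : Int → κ)
    (F : Int → ν → ν) (d0 : ν) : ∀ (l : List Int) (d : PySem.Dict κ ν) (k : κ),
    (l.foldl (fun d i => d.modify (key i) d0 (F i)) d).getD k d0 =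
      (l.filter (fun i => key i == k)).foldl (fun c i => F i c) (d.getD k d0) := by
  intro l
  induction l with
  | nil => intro d k; rfl
  | cons i rest ih =>
    intro d k
    simp only [List.foldl_cons, List.filter_cons]
    by_cases hk : key i = k
    · rw [if_pos (by simp [hk])]
      simp only [List.foldl_cons]
      rw [ih, ← hk, PySem.Dict.getD_modify_self]
    · rw [if_neg (by simp [hk])]
      rw [ih, PySem.Dict.getD_modify, if_neg (fun (hh : k = key i) => hk hh.symm)]

theorem matchLoop_keys (cnd : String → Bool) (h : String → Int → Int) :
    ∀ (ks : List String) (sc : PySem.Dict String Int), (∀ v ∈ ks, sc.contains v = true) →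
    (ks.foldl (fun sc val => if cnd val then sc.insert val (h val (sc.getD val 0)) else sc)
      sc).keys = sc.keys := by
  intro ks
  induction ks with
  | nil => intro sc _; rfl
  | cons val rest ih =>
    intro sc hmem
    simp only [List.foldl_cons]
    by_cases hc : cnd val = true
    · rw [if_pos hc]
      have hkeys : (sc.insert val (h val (sc.getD val 0))).keys = sc.keys :=
        PySem.Dict.keys_insert_of_contains sc _ (hmem val List.mem_cons_self)
      rw [ih _ (fun v hv => by
        rw [PySem.Dict.contains_insert, hmem v (List.mem_cons_of_mem _ hv)]
        simp), hkeys]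
    · rw [if_neg hc]
      exact ih _ (fun v hv => hmem v (List.mem_cons_of_mem _ hv))

theorem matchLoop_getD (cnd : String → Bool) (h : String → Int → Int) :
    ∀ (ks : List String) (sc : PySem.Dict String Int), ks.Nodup →
    ∀ v, (ks.foldl (fun sc val => if cnd val then sc.insert val (h val (sc.getD val 0)) else sc)
      sc).getD v 0 = if v ∈ ks ∧ cnd v = true then h v (sc.getD v 0) else sc.getD v 0 := by
  intro ks
  induction ks with
  | nil =>
    intro sc _ v
    simp
  | cons val rest ih =>
    intro sc hnd v
    simp only [List.foldl_cons]
    by_cases hcv : cnd val = true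
    · rw [if_pos hcv, ih _ hnd.of_cons v]
      by_cases hvv : v = val
      · subst hvv
        have hnr : v ∉ rest := (List.nodup_cons.mp hnd).1
        rw [if_neg (fun hh => hnr hh.1), PySem.Dict.getD_insert, if_pos rfl,
          if_pos ⟨List.mem_cons_self, hcv⟩]
      · rw [PySem.Dict.getD_insert, if_neg hvv]
        by_cases hm : v ∈ rest ∧ cnd v = true
        · rw [if_pos hm, if_pos ⟨List.mem_cons_of_mem _ hm.1, hm.2⟩]
        · rw [if_neg hm,
            if_neg (fun (hh : v ∈ val :: rest ∧ cnd v = true) =>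
              hm ⟨(List.mem_cons.mp hh.1).resolve_left hvv, hh.2⟩)]
    · rw [if_neg hcv, ih _ hnd.of_cons v]
      by_cases hm : v ∈ rest ∧ cnd v = true
      · rw [if_pos hm, if_pos ⟨List.mem_cons_of_mem _ hm.1, hm.2⟩]
      · rw [if_neg hm,
          if_neg (fun (hh : v ∈ val :: rest ∧ cnd v = true) =>
            hm ⟨(List.mem_cons.mp hh.1).resolve_left (fun he => hcv (he ▸ hh.2)), hh.2⟩)]

theorem step_getD (c : PySem.Dict String Int) (s t v : String) :
    ((c.insert s (c.getD s 0 + 1)).insert t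
      ((c.insert s (c.getD s 0 + 1)).getD t 0 - 1)).getD v 0
    = c.getD v 0 + (if s = v then 1 else 0) - (if t = v then 1 else 0) := by
  rw [PySem.Dict.getD_insert, PySem.Dict.getD_insert, PySem.Dict.getD_insert]
  split_ifs <;> (try subst_vars) <;> (try omega) <;> simp_all

theorem classCounter (sF tF : Int → String) :
    ∀ (J : List Int) (c : PySem.Dict String Int), c.keys.Nodup →
    ((J.foldl (fun c i => (c.insert (sF i) (c.getD (sF i) 0 + 1)).insert (tF i)
        ((c.insert (sF i) (c.getD (sF i) 0 + 1)).getD (tF i) 0 - 1)) c).keys.Nodup ∧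
     (∀ v, v ∈ (J.foldl (fun c i => (c.insert (sF i) (c.getD (sF i) 0 + 1)).insert (tF i)
        ((c.insert (sF i) (c.getD (sF i) 0 + 1)).getD (tF i) 0 - 1)) c).keys ↔
        (v ∈ c.keys ∨ v ∈ J.map sF ∨ v ∈ J.map tF)) ∧
     (∀ v, (J.foldl (fun c i => (c.insert (sF i) (c.getD (sF i) 0 + 1)).insert (tF i)
        ((c.insert (sF i) (c.getD (sF i) 0 + 1)).getD (tF i) 0 - 1)) c).getD v 0 =
        c.getD v 0 + ((J.map sF).count v : Int) - ((J.map tF).count v : Int))) := by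
  intro J
  induction J with
  | nil =>
    intro c hnd
    refine ⟨hnd, fun v => by simp, fun v => by simp⟩
  | cons i rest ih =>
    intro c hnd
    simp only [List.foldl_cons]
    have hnd1 : ((c.insert (sF i) (c.getD (sF i) 0 + 1)).insert (tF i)
        ((c.insert (sF i) (c.getD (sF i) 0 + 1)).getD (tF i) 0 - 1)).keys.Nodup :=
      PySem.Dict.nodup_keys_insert _ _ _ (PySem.Dict.nodup_keys_insert _ _ _ hnd)
    obtain ⟨k1, k2, k3⟩ := ih _ hnd1
    refine ⟨k1, ?_, ?_⟩
    · intro v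
      rw [k2 v, PySem.Dict.mem_keys_insert, PySem.Dict.mem_keys_insert]
      simp only [List.map_cons, List.mem_cons]
      tauto
    · intro v
      rw [k3 v, step_getD]
      simp only [List.map_cons, List.count_cons, beq_iff_eq]
      by_cases h1 : sF i = v <;> by_cases h2 : tF i = v <;>
        simp [h1, h2] <;> push_cast <;> ring

theorem sum_filter_pos (l : List Int) :
    (l.filter (fun v => 0 < v)).sum = (l.map (fun v => max 0 v)).sum := by
  induction l with
  | nil => rfl
  | cons x l ih =>
    simp only [List.filter_cons, List.map_cons, List.sum_cons]
    by_cases hx : 0 < x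
    · rw [if_pos (by simpa using hx), List.sum_cons, ih]
      omega
    · rw [if_neg (by simpa using hx), ih]
      omega

theorem sum_max0_keys_eq (S T : List String) (K : List String) (hnd : K.Nodup)
    (hmem : ∀ v, v ∈ K ↔ (v ∈ S ∨ v ∈ T)) :
    (K.map (fun v => max 0 ((S.count v : Int) - (T.count v : Int)))).sum
      = ((PySem.Set.ofList S).map (fun v => max 0 ((S.count v : Int) - (T.count v : Int)))).sum := by
  have hperm := List.filter_append_perm (fun v => decide (v ∈ S)) K
  have hsum := (hperm.map (fun v => max 0 ((S.count v : Int) - (T.count v : Int)))).sum_eq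
  rw [List.map_append, List.sum_append] at hsum
  have hzero : ((K.filter (fun v => !decide (v ∈ S))).map
      (fun v => max 0 ((S.count v : Int) - (T.count v : Int)))).sum = 0 := by
    apply List.sum_eq_zero
    intro x hx
    simp only [List.mem_map, List.mem_filter] at hx
    obtain ⟨v, ⟨_, hvs⟩, rfl⟩ := hx
    have hvs' : v ∉ S := by simpa using hvs
    rw [List.count_eq_zero.mpr hvs']
    have : 0 ≤ (T.count v : Int) := by positivity
    omega
  have hperm2 : (K.filter (fun v => decide (v ∈ S))).Perm (PySem.Set.ofList S) := by
    rw [List.perm_ext_iff_of_nodup (hnd.filter _) (PySem.Set.nodup_ofList S)]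
    intro v
    rw [List.mem_filter, PySem.Set.mem_ofList]
    constructor
    · intro ⟨_, hv⟩; simpa using hv
    · intro hv; exact ⟨(hmem v).mpr (Or.inl hv), by simpa using hv⟩
  have hsum2 := (hperm2.map (fun v => max 0 ((S.count v : Int) - (T.count v : Int)))).sum_eq
  omega

theorem contribA_eq (S T : List String) :
    ((PySem.Dict.counter S).keys.foldl (fun (sc : PySem.Dict String Int) val =>
        if (PySem.Dict.counter T).contains val then
          sc.insert val (sc.getD val 0 - min (sc.getD val 0) ((PySem.Dict.counter T).getD val 0))
        else sc) (PySem.Dict.counter S)).values.sum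
    = ((PySem.Set.ofList S).map
        (fun v => max 0 ((S.count v : Int) - (T.count v : Int)))).sum := by
  have hkeys : ((PySem.Dict.counter S).keys.foldl (fun (sc : PySem.Dict String Int) val =>
      if (PySem.Dict.counter T).contains val then
        sc.insert val (sc.getD val 0 - min (sc.getD val 0) ((PySem.Dict.counter T).getD val 0))
      else sc) (PySem.Dict.counter S)).keys = (PySem.Dict.counter S).keys :=
    matchLoop_keys (fun val => (PySem.Dict.counter T).contains val)
      (fun val x => x - min x ((PySem.Dict.counter T).getD val 0)) (PySem.Dict.counter S).keys
      (PySem.Dict.counter S)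
      (fun v hv => (PySem.Dict.contains_iff_mem_keys _ _).mpr hv)
  have hgetD : ∀ v, ((PySem.Dict.counter S).keys.foldl (fun (sc : PySem.Dict String Int) val =>
      if (PySem.Dict.counter T).contains val then
        sc.insert val (sc.getD val 0 - min (sc.getD val 0) ((PySem.Dict.counter T).getD val 0))
      else sc) (PySem.Dict.counter S)).getD v 0 =
      if v ∈ (PySem.Dict.counter S).keys ∧ (PySem.Dict.counter T).contains v = true then
        (PySem.Dict.counter S).getD v 0 -
          min ((PySem.Dict.counter S).getD v 0) ((PySem.Dict.counter T).getD v 0)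
      else (PySem.Dict.counter S).getD v 0 :=
    matchLoop_getD (fun val => (PySem.Dict.counter T).contains val)
      (fun val x => x - min x ((PySem.Dict.counter T).getD val 0)) (PySem.Dict.counter S).keys
      (PySem.Dict.counter S) (PySem.Dict.nodup_keys_counter S)
  rw [PySem.Dict.values_eq_map_keys _ (by rw [hkeys]; exact PySem.Dict.nodup_keys_counter S) 0,
    hkeys]
  apply congrArg
  have hofS : (PySem.Dict.counter S).keys = PySem.Set.ofList S := PySem.Dict.keys_counter S
  rw [← hofS]
  apply List.map_congr_left
  intro v hv'
  rw [hgetD v]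
  have hvS : v ∈ S := (PySem.Set.mem_ofList S v).mp (hofS ▸ hv')
  have hcS : 0 < S.count v := List.count_pos_iff.mpr hvS
  by_cases hc : (PySem.Dict.counter T).contains v = true
  · rw [if_pos ⟨hv', hc⟩, PySem.Dict.getD_counter, PySem.Dict.getD_counter]
    omega
  · rw [if_neg (fun hh => hc hh.2), PySem.Dict.getD_counter]
    have hvT : v ∉ T := by
      intro hvT
      apply hc
      rw [PySem.Dict.contains_iff_mem_keys, PySem.Dict.keys_counter]
      exact (PySem.Set.mem_ofList T v).mpr hvT
    rw [List.count_eq_zero.mpr hvT]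
    omega

theorem perclass (sF tF : Int → String) (J : List Int) :
    ((PySem.Dict.counter (J.map sF)).keys.foldl (fun (sc : PySem.Dict String Int) val =>
        if (PySem.Dict.counter (J.map tF)).contains val then
          sc.insert val (sc.getD val 0 -
            min (sc.getD val 0) ((PySem.Dict.counter (J.map tF)).getD val 0))
        else sc) (PySem.Dict.counter (J.map sF))).values.sum
    = ((J.foldl (fun (c : PySem.Dict String Int) i =>
          (c.insert (sF i) (c.getD (sF i) 0 + 1)).insert (tF i)
            ((c.insert (sF i) (c.getD (sF i) 0 + 1)).getD (tF i) 0 - 1))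
          PySem.Dict.empty).values.filter (fun v => 0 < v)).sum := by
  obtain ⟨k1, k2, k3⟩ := classCounter sF tF J PySem.Dict.empty
    (by rw [PySem.Dict.keys_empty]; exact List.nodup_nil)
  rw [contribA_eq (J.map sF) (J.map tF), sum_filter_pos,
    PySem.Dict.values_eq_map_keys _ k1 0, List.map_map]
  rw [← sum_max0_keys_eq (J.map sF) (J.map tF) _ k1 (fun v => by
    rw [k2 v, PySem.Dict.keys_empty]
    simp)]
  apply congrArg
  apply List.map_congr_left
  intro v _
  simp only [Function.comp]
  rw [k3 v, PySem.Dict.getD_empty]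
  omega

def repsFn (g : Int → Int) (l : List Int) : List Int :=
  l.foldl (fun acc x => if (acc.map g).contains (g x) then acc else acc ++ [x]) []

theorem repsFn_append (g : Int → Int) (l : List Int) (x : Int) :
    repsFn g (l ++ [x]) = if ((repsFn g l).map g).contains (g x) then repsFn g l
      else repsFn g l ++ [x] := by
  unfold repsFn
  rw [List.foldl_append]
  rfl

theorem repsFn_sub (g : Int → Int) (l : List Int) : ∀ x ∈ repsFn g l, x ∈ l := by
  induction l using List.reverseRecOn with
  | nil => intro x hx; exact absurd hx (by simp [repsFn])
  | append_singleton l y ih =>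
    intro x hx
    rw [repsFn_append] at hx
    by_cases hc : ((repsFn g l).map g).contains (g y)
    · rw [if_pos hc] at hx
      exact List.mem_append_left _ (ih x hx)
    · rw [if_neg hc] at hx
      rcases List.mem_append.mp hx with h | h
      · exact List.mem_append_left _ (ih x h)
      · exact List.mem_append.mpr (Or.inr h)

theorem ofList_map_eq_map_repsFn (g : Int → Int) (l : List Int) :
    PySem.Set.ofList (l.map g) = (repsFn g l).map g := by
  induction l using List.reverseRecOn with
  | nil => rfl
  | append_singleton l y ih =>
    rw [List.map_append, List.map_singleton, PySem.Set.ofList_append_singleton, ih, repsFn_append]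
    by_cases hc : ((repsFn g l).map g).contains (g y)
    · rw [if_pos hc, PySem.Set.add_of_mem (by simpa using hc)]
    · rw [if_neg hc, PySem.Set.add_of_not_mem (by simpa using hc), List.map_append]
      rfl

theorem repsFn_congr (g h : Int → Int) (l : List Int)
    (hc : ∀ x ∈ l, ∀ y ∈ l, (g x = g y ↔ h x = h y)) : repsFn g l = repsFn h l := by
  induction l using List.reverseRecOn with
  | nil => rfl
  | append_singleton l y ih =>
    have hc' : ∀ x ∈ l, ∀ y ∈ l, (g x = g y ↔ h x = h y) := fun x hx y hy =>
      hc x (List.mem_append_left _ hx) y (List.mem_append_left _ hy)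
    rw [repsFn_append, repsFn_append, ih hc']
    have hcond : (((repsFn h l).map g).contains (g y)) = (((repsFn h l).map h).contains (h y)) := by
      rw [Bool.eq_iff_iff]
      simp only [List.contains_iff_mem, List.mem_map]
      constructor
      · rintro ⟨w, hw, hz⟩
        exact ⟨w, hw, (hc w (List.mem_append_left _ (repsFn_sub h l w hw)) y (by simp)).mp hz⟩
      · rintro ⟨w, hw, hz⟩
        exact ⟨w, hw, (hc w (List.mem_append_left _ (repsFn_sub h l w hw)) y (by simp)).mpr hz⟩
    rw [hcond]

theorem main_eq (source target : List String) (allowed_swaps : List (Int × Int))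
    (hpre : Pre_min_hamming_distance source target allowed_swaps) :
    min_hamming_distance source target allowed_swaps =
      min_hamming_distance_alt source target allowed_swaps := by
  obtain ⟨-, hsw0⟩ := hpre
  unfold min_hamming_distance min_hamming_distance_alt
  simp only []
  set n := source.length with hn
  set l := PySem.List.pyRange 0 (n:Int) 1 with hl
  have hsw : ∀ q ∈ allowed_swaps, (-(n:Int) ≤ q.1 ∧ q.1 < (n:Int)) ∧
      (-(n:Int) ≤ q.2 ∧ q.2 < (n:Int)) := fun q hq => hsw0 q hq
  have hmem : ∀ i ∈ l, ∃ k : Nat, k < n ∧ i = ((k:Nat):Int) := by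
    intro i hi
    rw [hl, PySem.List.mem_pyRange_one] at hi
    exact ⟨i.toNat, by omega, by omega⟩
  set dsu1 := allowed_swaps.foldl (fun p ab => dsuUnion (n+1) p ab.1 ab.2) l with hdsu1
  set labs := allowed_swaps.foldl (fun (labels : List Int) ab =>
      if PySem.List.pyGetD labels ab.1 0 ≠ PySem.List.pyGetD labels ab.2 0 then
        labels.map (fun x => if x = PySem.List.pyGetD labels ab.1 0
          then PySem.List.pyGetD labels ab.2 0 else x)
      else labels) l with hlabs
  obtain ⟨hInvF, hlabslen, hiff⟩ :=
    (corr_fold n allowed_swaps hsw l l (corr_init n) : Corr n dsu1 labs)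
  have hgrp : (l.foldl (fun (st : List Int × PySem.Dict Int (List Int)) i =>
        ((dsuFind (n+1) st.1 i).1,
         st.2.modify (dsuFind (n+1) st.1 i).2 [] (· ++ [i]))) (dsu1, PySem.Dict.empty)).2
      = l.foldl (fun g i => g.modify ((rootp n dsu1 i.toNat : Nat):Int) [] (· ++ [i]))
          PySem.Dict.empty :=
    groups_fold n dsu1 l hmem dsu1 PySem.Dict.empty hInvF (fun j _ => rfl)
  rw [hgrp]
  rw [PySem.List.foldl_add, zero_add]
  set G := l.foldl (fun g i => g.modify ((rootp n dsu1 i.toNat : Nat):Int) [] (· ++ [i]))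
      PySem.Dict.empty with hG
  set diff := l.foldl (fun (d : PySem.Dict Int (PySem.Dict String Int)) i =>
      d.modify (PySem.List.pyGetD labs i 0) PySem.Dict.empty (fun c =>
        (c.insert (PySem.List.pyGetD source i "")
            (c.getD (PySem.List.pyGetD source i "") 0 + 1)).insert
          (PySem.List.pyGetD target i "")
          ((c.insert (PySem.List.pyGetD source i "")
              (c.getD (PySem.List.pyGetD source i "") 0 + 1)).getD
            (PySem.List.pyGetD target i "") 0 - 1))) PySem.Dict.empty with hdiff
  have hGnodup : G.keys.Nodup := by
    rw [hG]
    exact PySem.Dict.nodup_keys_foldl_modify_key l _ [] _ PySem.Dict.empty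
      (by rw [PySem.Dict.keys_empty]; exact List.nodup_nil)
  have hGkeys : G.keys = PySem.Set.ofList (l.map (fun i => ((rootp n dsu1 i.toNat : Nat):Int))) := by
    rw [hG, PySem.Dict.keys_foldl_modify_key l (fun i => ((rootp n dsu1 i.toNat : Nat):Int)) []
      (fun _ i => (fun x => x ++ [i])) PySem.Dict.empty, PySem.Dict.keys_empty,
      PySem.Set.update_nil_left]
  have hGclass : ∀ k, G.getD k [] =
      l.filter (fun i => ((rootp n dsu1 i.toNat : Nat):Int) == k) := by
    intro k
    rw [hG, getD_foldl_modify_fn (fun i => ((rootp n dsu1 i.toNat : Nat):Int))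
      (fun i => (fun x => x ++ [i])) [] l PySem.Dict.empty k, PySem.Dict.getD_empty,
      PySem.List.foldl_append_singleton_eq_self, List.nil_append]
  have hDnodup : diff.keys.Nodup := by
    rw [hdiff]
    exact PySem.Dict.nodup_keys_foldl_modify_key l _ PySem.Dict.empty _ PySem.Dict.empty
      (by rw [PySem.Dict.keys_empty]; exact List.nodup_nil)
  have hDkeys : diff.keys = PySem.Set.ofList (l.map (fun i => PySem.List.pyGetD labs i 0)) := by
    rw [hdiff, PySem.Dict.keys_foldl_modify_key l (fun i => PySem.List.pyGetD labs i 0)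
      PySem.Dict.empty _ PySem.Dict.empty, PySem.Dict.keys_empty, PySem.Set.update_nil_left]
  have hDclass : ∀ k, diff.getD k PySem.Dict.empty =
      (l.filter (fun i => PySem.List.pyGetD labs i 0 == k)).foldl (fun c i =>
        (c.insert (PySem.List.pyGetD source i "")
            (c.getD (PySem.List.pyGetD source i "") 0 + 1)).insert
          (PySem.List.pyGetD target i "")
          ((c.insert (PySem.List.pyGetD source i "")
              (c.getD (PySem.List.pyGetD source i "") 0 + 1)).getD
            (PySem.List.pyGetD target i "") 0 - 1)) PySem.Dict.empty := by
    intro k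
    rw [hdiff, getD_foldl_modify_fn (fun i => PySem.List.pyGetD labs i 0) _ PySem.Dict.empty l
      PySem.Dict.empty k, PySem.Dict.getD_empty]
  have hbr : ∀ x ∈ l, ∀ y ∈ l,
      (((rootp n dsu1 x.toNat : Nat):Int) = ((rootp n dsu1 y.toNat : Nat):Int) ↔
       PySem.List.pyGetD labs x 0 = PySem.List.pyGetD labs y 0) := by
    intro x hx y hy
    obtain ⟨kx, hkx, rfl⟩ := hmem x hx
    obtain ⟨ky, hky, rfl⟩ := hmem y hy
    rw [PySem.List.pyGetD_natCast, PySem.List.pyGetD_natCast,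
      show ((kx:Nat):Int).toNat = kx by omega, show ((ky:Nat):Int).toNat = ky by omega,
      Nat.cast_inj]
    exact (hiff kx hkx ky hky).symm
  rw [PySem.Dict.values_eq_map_keys G hGnodup [], List.map_map, hGkeys,
    ofList_map_eq_map_repsFn _ l, List.map_map]
  rw [PySem.Dict.values_eq_map_keys diff hDnodup PySem.Dict.empty, List.map_map, hDkeys,
    ofList_map_eq_map_repsFn _ l, List.map_map]
  rw [← repsFn_congr (fun i => ((rootp n dsu1 i.toNat : Nat):Int))
    (fun i => PySem.List.pyGetD labs i 0) l hbr]
  apply congrArg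
  apply List.map_congr_left
  intro x hx
  have hxl : x ∈ l := repsFn_sub _ l x hx
  simp only [Function.comp]
  rw [hGclass _, hDclass _]
  have hcls : l.filter (fun i => ((rootp n dsu1 i.toNat:Nat):Int) ==
      ((rootp n dsu1 x.toNat:Nat):Int)) =
      l.filter (fun i => PySem.List.pyGetD labs i 0 == PySem.List.pyGetD labs x 0) := by
    apply List.filter_congr
    intro i hi
    rw [Bool.eq_iff_iff]
    simp only [beq_iff_eq]
    exact hbr i hi x hxl
  rw [hcls]
  exact perclass (fun i => PySem.List.pyGetD source i "")
    (fun i => PySem.List.pyGetD target i "")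
    (l.filter (fun i => PySem.List.pyGetD labs i 0 == PySem.List.pyGetD labs x 0))

-- ===== VERDICT =====
theorem min_hamming_distance_spec : Claim_equal_min_hamming_distance := by
  unfold Claim_equal_min_hamming_distance
  intro source target allowed_swaps _ hpre
  unfold Spec_min_hamming_distance
  exact main_eq source target allowed_swaps hpre
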